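-- pv_equiv track=rewrite | github.com/981377660LMT/algorithm-study | leetcode/403/4.py | _collectCols
-- ===== SOURCE A (Python) =====
-- from typing import List
--
-- def _collectCols(grid: List[List[int]]) -> List[int]:
--     res = []
--     for c, col in enumerate(zip(*grid)):
--         for v in col:
--             if v == 1:
--                 res.append(c)
--                 break
--     return res
-- ===== SOURCE B (Python) =====
-- from typing import List
--
-- def _collectCols(grid: List[List[int]]) -> List[int]:
--     ncols = min((len(r) for r in grid), default=0)
--     seen = set()
--     for row in grid:
--         for c, v in enumerate(row):
--             if c < ncols and v == 1:
--                 seen.add(c)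
--     return sorted(seen)
-- ===== Notes on version B (the rewrite author's own statement) =====
-- stated objective: alternative
-- what changed: Row-major single scan into a set of column indices bounded by the shortest row length, then sorted, instead of transposing with zip and scanning each column with an inner break.
import Mathlib
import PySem

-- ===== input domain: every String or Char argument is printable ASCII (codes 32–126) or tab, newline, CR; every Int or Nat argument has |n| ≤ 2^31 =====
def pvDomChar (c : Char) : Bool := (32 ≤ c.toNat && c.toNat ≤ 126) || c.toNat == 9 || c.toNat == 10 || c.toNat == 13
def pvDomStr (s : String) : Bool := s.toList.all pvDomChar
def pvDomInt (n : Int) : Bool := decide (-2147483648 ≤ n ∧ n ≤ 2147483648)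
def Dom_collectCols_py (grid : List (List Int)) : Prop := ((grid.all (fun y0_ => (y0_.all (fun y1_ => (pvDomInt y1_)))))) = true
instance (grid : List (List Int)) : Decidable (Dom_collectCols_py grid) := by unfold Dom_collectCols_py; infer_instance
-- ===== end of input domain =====

-- B scans the grid row-major into a set of column indices (bounded by the shortest
-- row length, matching zip's truncation) and returns the sorted set, instead of
-- transposing with zip(*grid) and scanning each column with an inner break.

-- ===== PORT A =====
-- sum of tail lengths decreases (termination of pvZipStar)
theorem pvSumTailLe (g : List (List Int)) :
    (g.map (fun r => r.length - 1)).sum ≤ (g.map (fun r => r.length)).sum := by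
  induction g with
  | nil => simp
  | cons r rs ih =>
      simp only [List.map_cons, List.sum_cons]
      omega

-- zip(*grid): take heads while no row is exhausted (zip() with no args is empty)
def pvZipStar (g : List (List Int)) : List (List Int) :=
  if g = [] ∨ g.any (fun r => r.isEmpty) then []
  else (g.map (fun r => r.headI)) :: pvZipStar (g.map (fun r => r.tail))
termination_by (g.map (fun r => r.length)).sum
decreasing_by
  rename_i h
  have hne : g ≠ [] := fun h0 => h (Or.inl h0)
  have hall : ∀ r ∈ g, r ≠ [] := by
    intro r hr h0
    apply h
    right
    rw [List.any_eq_true]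
    exact ⟨r, hr, List.isEmpty_iff.mpr h0⟩
  simp only [List.map_map, Function.comp_def, List.length_tail, List.map_subtype,
    List.unattach_attach]
  cases g with
  | nil => exact absurd rfl hne
  | cons r rs =>
      simp only [List.map_cons, List.sum_cons]
      have h1 : 1 ≤ r.length := by
        have : r ≠ [] := hall r (by simp)
        cases r with
        | nil => exact absurd rfl this
        | cons x t => simp
      have h2 := pvSumTailLe rs
      omega

-- the inner 'for v in col: if v == 1: res.append(c); break'
def pvInner (c : Int) (col : List Int) (res : List Int) : List Int :=
  match col with
  | [] => res
  | v :: rest => if v = 1 then res ++ [c] else pvInner c rest res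

def collectCols_py (grid : List (List Int)) : List Int :=
  (PySem.List.enumerate (pvZipStar grid)).foldl (fun res p => pvInner p.1 p.2 res) []

-- ===== PORT B =====
-- min(iterable, default=0)
def pvMinD0 (xs : List Int) : Int :=
  match xs with
  | [] => 0
  | x :: rest => rest.foldl min x

def collectCols_py_alt (grid : List (List Int)) : List Int :=
  let ncols : Int := pvMinD0 (grid.map (fun r => (r.length : Int)))
  let seen : PySem.Set Int :=
    grid.foldl (fun (s : PySem.Set Int) (row : List Int) =>
      (PySem.List.enumerate row).foldl
        (fun (s : PySem.Set Int) (p : Int × Int) =>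
          if p.1 < ncols ∧ p.2 = 1 then PySem.Set.add s p.1 else s) s)
      PySem.Set.empty
  PySem.List.sorted seen (fun x => x)

-- ===== PRECONDITION & SPEC =====
def Spec_collectCols_py (grid : List (List Int)) (out : List Int) : Prop := out = collectCols_py_alt grid
instance (grid : List (List Int)) (out : List Int) : Decidable (Spec_collectCols_py grid out) := by unfold Spec_collectCols_py; infer_instance

-- ===== CLAIM (what is proved, stated in full; the proofs are below) =====
def Claim_equal_collectCols_py : Prop := ∀ (grid : List (List Int)), Dom_collectCols_py grid → Spec_collectCols_py grid (collectCols_py grid)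

-- ===== LEMMAS AND PROOFS =====

-- length of the shortest row (0 for the empty grid)
def pvMinLen (g : List (List Int)) : Nat :=
  match g with
  | [] => 0
  | r :: rs => rs.foldl (fun a s => min a s.length) r.length

-- column c of g, reading each row with default 0
def pvColFn (g : List (List Int)) (c : Nat) : List Int :=
  g.map (fun r => r.getD c 0)

theorem pvFoldlMin_le_init (rs : List (List Int)) (a : Nat) :
    rs.foldl (fun a s => min a s.length) a ≤ a := by
  induction rs generalizing a with
  | nil => simp
  | cons s rs ih =>
      simp only [List.foldl_cons]
      exact le_trans (ih (min a s.length)) (Nat.min_le_left _ _)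

theorem pvFoldlMin_le_mem (rs : List (List Int)) (a : Nat) (s : List Int) (hs : s ∈ rs) :
    rs.foldl (fun a s => min a s.length) a ≤ s.length := by
  induction rs generalizing a with
  | nil => simp at hs
  | cons t rs ih =>
      rcases List.mem_cons.mp hs with h | h
      · subst h
        simp only [List.foldl_cons]
        exact le_trans (pvFoldlMin_le_init rs (min a s.length)) (Nat.min_le_right _ _)
      · exact ih _ h

theorem pvMinLen_le (g : List (List Int)) (r : List Int) (hr : r ∈ g) :
    pvMinLen g ≤ r.length := by
  cases g with
  | nil => simp at hr
  | cons t rs =>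
      rcases List.mem_cons.mp hr with h | h
      · subst h; exact pvFoldlMin_le_init rs _
      · exact pvFoldlMin_le_mem rs _ _ h

theorem pvFoldlMin_eq_zero (rs : List (List Int)) (a : Nat)
    (h : rs.foldl (fun a s => min a s.length) a = 0) :
    a = 0 ∨ ∃ s ∈ rs, s.length = 0 := by
  induction rs generalizing a with
  | nil => simp at h; exact Or.inl h
  | cons t rs ih =>
      rcases ih _ h with h0 | ⟨s, hs, h0⟩
      · rcases Nat.min_eq_zero_iff.mp h0 with h1 | h1
        · exact Or.inl h1
        · exact Or.inr ⟨t, by simp, h1⟩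
      · exact Or.inr ⟨s, by simp [hs], h0⟩

theorem pvFoldlMin_sub_one (rs : List (List Int)) (a : Nat) (ha : 1 ≤ a)
    (hall : ∀ s ∈ rs, 1 ≤ s.length) :
    rs.foldl (fun x s => min x (s.length - 1)) (a - 1)
      = rs.foldl (fun x s => min x s.length) a - 1 := by
  induction rs generalizing a with
  | nil => simp
  | cons t rs ih =>
      have ht : 1 ≤ t.length := hall t (by simp)
      have : min (a - 1) (t.length - 1) = min a t.length - 1 := by omega
      simp only [List.foldl_cons, this]
      exact ih _ (by omega) (fun s hs => hall s (by simp [hs]))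

theorem pvMinLen_tail (g : List (List Int)) (hall : ∀ r ∈ g, r ≠ []) :
    pvMinLen (g.map (fun r => r.tail)) = pvMinLen g - 1 := by
  cases g with
  | nil => simp [pvMinLen]
  | cons r rs =>
      have hlen : ∀ s ∈ rs, s.tail.length = s.length - 1 := by
        intro s hs
        cases s with
        | nil => exact absurd rfl (hall [] (by simp [hs]))
        | cons x t => simp
      have hr : 1 ≤ r.length := by
        have := hall r (by simp)
        cases r with
        | nil => exact absurd rfl this
        | cons x t => simp
      simp only [pvMinLen, List.map_cons, List.foldl_map]
      have hcongr : rs.foldl (fun a s => min a s.tail.length) r.tail.length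
          = rs.foldl (fun x s => min x (s.length - 1)) (r.length - 1) := by
        have htl : r.tail.length = r.length - 1 := by
          cases r with
          | nil => simp
          | cons x t => simp
        rw [htl]
        exact PySem.List.foldl_congr_mem rs _ _ _ (fun a s hs => by rw [hlen s hs])
      rw [hcongr, pvFoldlMin_sub_one rs r.length hr
        (fun s hs => by have := hall s (by simp [hs]); cases s with
          | nil => exact absurd rfl this
          | cons x t => simp)]

theorem pvColFn_zero (g : List (List Int)) : pvColFn g 0 = g.map (fun r => r.headI) := by
  unfold pvColFn
  apply List.map_congr_left
  intro r _
  cases r <;> simp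

theorem pvColFn_tail (g : List (List Int)) (c : Nat) :
    pvColFn (g.map (fun r => r.tail)) c = pvColFn g (c + 1) := by
  unfold pvColFn
  rw [List.map_map]
  apply List.map_congr_left
  intro r _
  cases r <;> simp

theorem pvZipStar_eq (n : Nat) : ∀ (g : List (List Int)), pvMinLen g = n →
    pvZipStar g = (List.range n).map (pvColFn g) := by
  induction n with
  | zero =>
      intro g hm
      rw [pvZipStar.eq_def]
      simp only [List.range_zero, List.map_nil]
      split
      · rfl
      · rename_i h
        have hne : g ≠ [] := fun h0 => h (Or.inl h0)
        have hany : ¬ g.any (fun r => r.isEmpty) = true := fun h0 => h (Or.inr h0)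
        exfalso
        cases g with
        | nil => exact hne rfl
        | cons r rs =>
            rcases pvFoldlMin_eq_zero rs r.length hm with h0 | ⟨s, hs, h0⟩
            · exact hany (List.any_eq_true.mpr ⟨r, List.mem_cons_self, List.isEmpty_iff.mpr (List.length_eq_zero_iff.mp h0)⟩)
            · exact hany (List.any_eq_true.mpr ⟨s, List.mem_cons_of_mem r hs, List.isEmpty_iff.mpr (List.length_eq_zero_iff.mp h0)⟩)
  | succ n ih =>
      intro g hm
      have hgne : g ≠ [] := by
        intro h; subst h; simp [pvMinLen] at hm
      have hall : ∀ r ∈ g, r ≠ [] := by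
        intro r hr h0
        have := pvMinLen_le g r hr
        rw [h0] at this
        simp at this
        omega
      rw [pvZipStar.eq_def]
      have hcond : ¬ (g = [] ∨ g.any (fun r => r.isEmpty) = true) := by
        rintro (h | h)
        · exact hgne h
        · rw [List.any_eq_true] at h
          obtain ⟨r, hr, hemp⟩ := h
          exact hall r hr (List.isEmpty_iff.mp hemp)
      rw [if_neg hcond]
      have htail : pvMinLen (g.map (fun r => r.tail)) = n := by
        rw [pvMinLen_tail g hall, hm]
        omega
      rw [ih _ htail]
      rw [List.range_succ_eq_map, List.map_cons, List.map_map]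
      congr 1
      · exact (pvColFn_zero g).symm
      · apply List.map_congr_left
        intro k _
        simp only [Function.comp]
        exact pvColFn_tail g k

theorem pvInner_eq (c : Int) (col res : List Int) :
    pvInner c col res = if (1 : Int) ∈ col then res ++ [c] else res := by
  induction col with
  | nil => simp [pvInner]
  | cons v rest ih =>
      by_cases hv : v = 1
      · subst hv; simp [pvInner]
      · rw [pvInner, if_neg hv, ih]
        by_cases hm : (1 : Int) ∈ rest
        · simp [hm, List.mem_cons]
        · have h1 : ¬ (1 : Int) = v := fun h => hv h.symm
          simp [hm, List.mem_cons, h1]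

theorem pvEnumerate_map_range {α : Type} (n : Nat) :
    ∀ (f : Nat → α) (s : Int),
    PySem.List.enumerate ((List.range n).map f) s
      = (List.range n).map (fun (k : Nat) => (s + (k : Int), f k)) := by
  induction n with
  | zero => intro f s; simp [PySem.List.enumerate_nil]
  | succ n ih =>
      intro f s
      rw [List.range_succ_eq_map, List.map_cons, PySem.List.enumerate_cons,
        List.map_map, ih (f ∘ Nat.succ) (s + 1), List.map_cons, List.map_map]
      congr 1
      · simp
      · apply List.map_congr_left
        intro k _
        simp only [Function.comp_def, Nat.succ_eq_add_one]
        congr 1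
        push_cast
        ring

-- A computes the increasing list of column indices c < pvMinLen whose column holds a 1
theorem collectCols_py_char (g : List (List Int)) :
    collectCols_py g
      = ((List.range (pvMinLen g)).filter (fun c => decide ((1 : Int) ∈ pvColFn g c))).map
          (fun c : Nat => (c : Int)) := by
  unfold collectCols_py
  rw [pvZipStar_eq (pvMinLen g) g rfl]
  rw [pvEnumerate_map_range (pvMinLen g) (pvColFn g) 0]
  rw [List.foldl_map]
  have hbody : ∀ (res : List Int) (k : Nat),
      pvInner ((0 : Int) + (k : Int)) (pvColFn g k) res
        = if (fun c => decide ((1 : Int) ∈ pvColFn g c)) k = true then res ++ [(k : Int)] else res := by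
    intro res k
    rw [pvInner_eq]
    simp
  calc (List.range (pvMinLen g)).foldl
        (fun (res : List Int) (k : Nat) => pvInner ((0:Int) + (k:Int)) (pvColFn g k) res) []
      = (List.range (pvMinLen g)).foldl
        (fun res k => if (fun c => decide ((1 : Int) ∈ pvColFn g c)) k = true then res ++ [(k : Int)] else res) [] := by
        exact PySem.List.foldl_congr_mem _ _ _ _ (fun res k _ => hbody res k)
    _ = _ := by
        rw [PySem.List.foldl_append_if (fun c => decide ((1 : Int) ∈ pvColFn g c)) (fun c : Nat => (c : Int)) (List.range (pvMinLen g)) [], List.nil_append]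

-- B's ncols is pvMinLen
theorem pvFoldlMin_cast (rs : List (List Int)) (a : Nat) :
    rs.foldl (fun x s => min x (s.length : Int)) (a : Int)
      = ((rs.foldl (fun x s => min x s.length) a : Nat) : Int) := by
  induction rs generalizing a with
  | nil => simp
  | cons t rs ih =>
      simp only [List.foldl_cons]
      rw [← Nat.cast_min, ih]

theorem pvNcols_eq (g : List (List Int)) :
    pvMinD0 (g.map (fun r => (r.length : Int))) = (pvMinLen g : Int) := by
  cases g with
  | nil => simp [pvMinD0, pvMinLen]
  | cons r rs =>
      simp only [List.map_cons, pvMinD0, pvMinLen]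
      rw [List.foldl_map]
      exact pvFoldlMin_cast rs r.length

-- membership/nodup through the inner and outer folds of B
theorem pvInnerFold_nodup (P : Int × Int → Prop) [DecidablePred P]
    (l : List (Int × Int)) (s : PySem.Set Int) (hs : List.Nodup s) :
    List.Nodup (l.foldl (fun s p => if P p then PySem.Set.add s p.1 else s) s) := by
  induction l generalizing s with
  | nil => exact hs
  | cons p l ih =>
      simp only [List.foldl_cons]
      by_cases hp : P p
      · rw [if_pos hp]; exact ih _ (PySem.Set.nodup_add s p.1 hs)
      · rw [if_neg hp]; exact ih _ hs

theorem pvInnerFold_mem (P : Int × Int → Prop) [DecidablePred P]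
    (l : List (Int × Int)) (s : PySem.Set Int) (x : Int) :
    x ∈ l.foldl (fun s p => if P p then PySem.Set.add s p.1 else s) s
      ↔ x ∈ s ∨ ∃ p ∈ l, P p ∧ x = p.1 := by
  induction l generalizing s with
  | nil => simp
  | cons p l ih =>
      simp only [List.foldl_cons]
      by_cases hp : P p
      · rw [if_pos hp, ih]
        constructor
        · rintro (h | h)
          · rcases (PySem.Set.mem_add s p.1 x).mp h with h | h
            · exact Or.inl h
            · exact Or.inr ⟨p, by simp, hp, h⟩
          · obtain ⟨q, hq, h1, h2⟩ := h
            exact Or.inr ⟨q, by simp [hq], h1, h2⟩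
        · rintro (h | ⟨q, hq, h1, h2⟩)
          · exact Or.inl ((PySem.Set.mem_add s p.1 x).mpr (Or.inl h))
          · rcases List.mem_cons.mp hq with h | h
            · subst h; exact Or.inl ((PySem.Set.mem_add s q.1 x).mpr (Or.inr h2))
            · exact Or.inr ⟨q, h, h1, h2⟩
      · rw [if_neg hp, ih]
        constructor
        · rintro (h | ⟨q, hq, h1, h2⟩)
          · exact Or.inl h
          · exact Or.inr ⟨q, by simp [hq], h1, h2⟩
        · rintro (h | ⟨q, hq, h1, h2⟩)
          · exact Or.inl h
          · rcases List.mem_cons.mp hq with h | h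
            · subst h; exact absurd h1 hp
            · exact Or.inr ⟨q, h, h1, h2⟩

theorem pvOuterFold_nodup (P : Int × Int → Prop) [DecidablePred P]
    (g : List (List Int)) (s : PySem.Set Int) (hs : List.Nodup s) :
    List.Nodup (g.foldl (fun s row =>
      (PySem.List.enumerate row).foldl
        (fun s p => if P p then PySem.Set.add s p.1 else s) s) s) := by
  induction g generalizing s with
  | nil => exact hs
  | cons row g ih =>
      simp only [List.foldl_cons]
      exact ih _ (pvInnerFold_nodup P _ s hs)

theorem pvOuterFold_mem (P : Int × Int → Prop) [DecidablePred P]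
    (g : List (List Int)) (s : PySem.Set Int) (x : Int) :
    x ∈ g.foldl (fun s row =>
      (PySem.List.enumerate row).foldl
        (fun s p => if P p then PySem.Set.add s p.1 else s) s) s
      ↔ x ∈ s ∨ ∃ row ∈ g, ∃ p ∈ PySem.List.enumerate row, P p ∧ x = p.1 := by
  induction g generalizing s with
  | nil => simp
  | cons row g ih =>
      simp only [List.foldl_cons]
      rw [ih, pvInnerFold_mem]
      constructor
      · rintro ((h | ⟨p, hp, h1, h2⟩) | ⟨r, hr, hp⟩)
        · exact Or.inl h
        · exact Or.inr ⟨row, by simp, p, hp, h1, h2⟩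
        · exact Or.inr ⟨r, by simp [hr], hp⟩
      · rintro (h | ⟨r, hr, hp⟩)
        · exact Or.inl (Or.inl h)
        · rcases List.mem_cons.mp hr with h | h
          · subst h
            obtain ⟨p, hp1, hp2, hp3⟩ := hp
            exact Or.inl (Or.inr ⟨p, hp1, hp2, hp3⟩)
          · exact Or.inr ⟨r, h, hp⟩

theorem pvMem_enumerate {α : Type} (row : List α) :
    ∀ (s : Int) (p : Int × α), p ∈ PySem.List.enumerate row s
      ↔ ∃ k : Nat, k < row.length ∧ p.1 = s + (k : Int) ∧ ∃ h : k < row.length, p.2 = row[k] := by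
  induction row with
  | nil => intro s p; simp [PySem.List.enumerate_nil]
  | cons x xs ih =>
      intro s p
      rw [PySem.List.enumerate_cons, List.mem_cons, ih (s + 1) p]
      constructor
      · rintro (h | ⟨k, hk, h1, hk2, h2⟩)
        · subst h
          exact ⟨0, by simp, by simp, by simp, by simp⟩
        · refine ⟨k + 1, by simpa using hk, ?_, by simpa using hk, by simpa using h2⟩
          rw [h1]; push_cast; ring
      · rintro ⟨k, hk, h1, hk2, h2⟩
        cases k with
        | zero =>
            left
            have : p.1 = s := by simpa using h1
            have h2' : p.2 = x := by simpa using h2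
            cases p
            simp_all
        | succ k =>
            right
            refine ⟨k, by simpa using hk, ?_, by simpa using hk, by simpa using h2⟩
            rw [h1]; push_cast; ring

-- the canonical result list is strictly increasing and nodup
theorem pvAcol_pairwise (g : List (List Int)) :
    (((List.range (pvMinLen g)).filter (fun c => decide ((1 : Int) ∈ pvColFn g c))).map
      (fun c : Nat => (c : Int))).Pairwise (· < ·) := by
  exact List.Pairwise.map (fun c : Nat => (c : Int))
    (fun a b h => by simpa using h)
    ((List.pairwise_lt_range).filter _)

theorem pvAcol_nodup (g : List (List Int)) :
    (((List.range (pvMinLen g)).filter (fun c => decide ((1 : Int) ∈ pvColFn g c))).map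
      (fun c : Nat => (c : Int))).Nodup :=
  List.Pairwise.imp (fun h => ne_of_lt h) (pvAcol_pairwise g)

-- ===== VERDICT (by name: the statement is the Claim_ definition above) =====
theorem collectCols_py_spec : Claim_equal_collectCols_py := by
  intro g _
  unfold Spec_collectCols_py collectCols_py_alt
  rw [pvNcols_eq g]
  set P : Int × Int → Prop := fun p => p.1 < (pvMinLen g : Int) ∧ p.2 = 1 with hP
  rw [collectCols_py_char g]
  symm
  apply PySem.List.sorted_eq_of_perm_of_pairwise_lt _ _ _ _ (pvAcol_pairwise g)
  have hseen : List.Nodup (g.foldl (fun s row =>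
      (PySem.List.enumerate row).foldl
        (fun s p => if P p then PySem.Set.add s p.1 else s) s) PySem.Set.empty) :=
    pvOuterFold_nodup P g PySem.Set.empty List.nodup_nil
  rw [List.perm_ext_iff_of_nodup (pvAcol_nodup g) hseen]
  intro x
  rw [pvOuterFold_mem P g PySem.Set.empty x]
  simp only [PySem.Set.empty, List.not_mem_nil, false_or, List.mem_map, List.mem_filter,
    List.mem_range, decide_eq_true_eq]
  constructor
  · rintro ⟨c, ⟨hc, hmem⟩, rfl⟩
    unfold pvColFn at hmem
    rw [List.mem_map] at hmem
    obtain ⟨row, hrow, hval⟩ := hmem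
    have hlen : c < row.length := lt_of_lt_of_le hc (pvMinLen_le g row hrow)
    refine ⟨row, hrow, ((c : Int), (1 : Int)), ?_, ?_, rfl⟩
    · rw [pvMem_enumerate row 0 ((c : Int), 1)]
      refine ⟨c, hlen, by simp, hlen, ?_⟩
      simp only
      rw [← hval, List.getD_eq_getElem row 0 hlen]
    · exact ⟨by show (c : Int) < ((pvMinLen g : Nat) : Int); exact_mod_cast hc, rfl⟩
  · rintro ⟨row, hrow, p, hp, ⟨hlt, hone⟩, rfl⟩
    rw [pvMem_enumerate row 0 p] at hp
    obtain ⟨k, hk, h1, hk2, h2⟩ := hp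
    have hkc : p.1 = (k : Int) := by simpa using h1
    have hkm : k < pvMinLen g := by
      rw [hkc] at hlt
      exact_mod_cast hlt
    refine ⟨k, ⟨hkm, ?_⟩, hkc.symm⟩
    unfold pvColFn
    rw [List.mem_map]
    refine ⟨row, hrow, ?_⟩
    rw [List.getD_eq_getElem row 0 hk, ← h2, hone]
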